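-- pv_equiv track=rewrite | github.com/daniel-reich/ubiquitous-fiesta | 5uMJmbN2uihcyEu75_15.py | weekly_salary
-- ===== SOURCE A (Python) =====
-- def weekly_salary(hours):
--     x = 0
--     for i in range(0,5):
--         if hours[i] > 8:
--             x += 15 * ( hours[i] - 8 ) + 80
--         else:
--             x += 10 * hours[i]
--     for j in range(5,7):
--         if hours[j] > 8:
--             x += 30 * ( hours[j] - 8 ) + 160
--         else:
--             x += 20 * hours[j]
--     return x
-- ===== SOURCE B (Python) =====
-- def weekly_salary(hours):
--     # Staged aggregate passes: base pay at the weekday rate for all 7 days,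
--     # plus the weekend rates doubled via the weekend slice, plus half-rate
--     # overtime on hours above 8 (doubled again for weekend days).
--     week = [hours[i] for i in range(7)]
--     overtime = [max(h - 8, 0) for h in week]
--     base = 10 * sum(week) + 10 * sum(week[5:])
--     extra = 5 * sum(overtime) + 5 * sum(overtime[5:])
--     return base + extra
-- ===== Notes on version B (the rewrite author's own statement) =====
-- stated objective: alternative
-- what changed: Replaces the two branching index loops by branch-free staged aggregates: a base pay of 10x the sum of all 7 days plus the weekend slice, and a half-rate overtime surcharge computed from a max(h-8,0) pass, with weekend doubling obtained by adding the weekend slice sums again.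
import Mathlib
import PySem

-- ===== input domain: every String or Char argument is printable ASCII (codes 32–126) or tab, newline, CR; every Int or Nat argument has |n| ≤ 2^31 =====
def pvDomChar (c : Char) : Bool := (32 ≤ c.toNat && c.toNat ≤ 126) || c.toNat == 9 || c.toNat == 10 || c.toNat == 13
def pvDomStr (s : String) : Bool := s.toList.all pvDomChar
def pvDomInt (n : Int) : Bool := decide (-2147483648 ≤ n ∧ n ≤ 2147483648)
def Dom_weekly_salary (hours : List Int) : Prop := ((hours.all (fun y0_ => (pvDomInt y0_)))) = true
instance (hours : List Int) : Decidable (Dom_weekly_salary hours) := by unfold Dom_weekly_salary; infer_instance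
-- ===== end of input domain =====

-- B replaces A's branching per-day loops by branch-free staged sums (base pay + weekend
-- surcharge + half-rate overtime from a max(h-8,0) pass); objective: alternative (same cost).

-- ===== PORT A =====
-- A indexes hours[0..6]; pyGet? returns none on IndexError, Pre_ excludes that.
def weekly_salary (hours : List Int) : Int :=
  let x : Int :=
    (PySem.List.pyRange 0 5 1).foldl (fun x i =>
      let h := (PySem.List.pyGet? hours i).getD 0
      if h > 8 then x + (15 * (h - 8) + 80) else x + 10 * h) 0
  (PySem.List.pyRange 5 7 1).foldl (fun x j =>
    let h := (PySem.List.pyGet? hours j).getD 0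
    if h > 8 then x + (30 * (h - 8) + 160) else x + 20 * h) x

-- ===== PORT B =====
def weekly_salary_alt (hours : List Int) : Int :=
  let week := (PySem.List.pyRange 0 7 1).map (fun i => (PySem.List.pyGet? hours i).getD 0)
  let overtime := week.map (fun h => max (h - 8) 0)
  let base := 10 * week.sum + 10 * (PySem.List.slice week (some 5) none).sum
  let extra := 5 * overtime.sum + 5 * (PySem.List.slice overtime (some 5) none).sum
  base + extra

-- ===== PRECONDITION & SPEC =====
-- A raises IndexError when fewer than 7 entries are given; Pre_ excludes exactly those.
def Pre_weekly_salary (hours : List Int) : Prop := 7 ≤ hours.length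
instance (hours : List Int) : Decidable (Pre_weekly_salary hours) := by unfold Pre_weekly_salary; infer_instance
def pvWitness_weekly_salary : List Int := [1, 9, 0, 8, 10, 3, 12]

def Spec_weekly_salary (hours : List Int) (out : Int) : Prop := out = weekly_salary_alt hours
instance (hours : List Int) (out : Int) : Decidable (Spec_weekly_salary hours out) := by unfold Spec_weekly_salary; infer_instance

-- ===== CLAIM (what is proved, stated in full; the proofs are below) =====
def Claim_equal_weekly_salary : Prop := ∀ (hours : List Int), Dom_weekly_salary hours → Pre_weekly_salary hours → Spec_weekly_salary hours (weekly_salary hours)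

-- ===== LEMMAS AND PROOFS =====

-- ===== VERDICT (by name: the statement is the Claim_ definition above) =====
set_option maxHeartbeats 1000000 in
theorem weekly_salary_spec : Claim_equal_weekly_salary := by
  intro hours _ hpre
  unfold Pre_weekly_salary at hpre
  match hours with
  | a :: b :: c :: d :: e :: f :: g :: rest =>
    show weekly_salary _ = weekly_salary_alt _
    have g0 : PySem.List.pyGet? (a :: b :: c :: d :: e :: f :: g :: rest) (0 : Int) = some a := by
      rw [show (0 : Int) = ((0 : Nat) : Int) from rfl, PySem.List.pyGet?_natCast]; rfl
    have g1 : PySem.List.pyGet? (a :: b :: c :: d :: e :: f :: g :: rest) (1 : Int) = some b := by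
      rw [show (1 : Int) = ((1 : Nat) : Int) from rfl, PySem.List.pyGet?_natCast]; rfl
    have g2 : PySem.List.pyGet? (a :: b :: c :: d :: e :: f :: g :: rest) (2 : Int) = some c := by
      rw [show (2 : Int) = ((2 : Nat) : Int) from rfl, PySem.List.pyGet?_natCast]; rfl
    have g3 : PySem.List.pyGet? (a :: b :: c :: d :: e :: f :: g :: rest) (3 : Int) = some d := by
      rw [show (3 : Int) = ((3 : Nat) : Int) from rfl, PySem.List.pyGet?_natCast]; rfl
    have g4 : PySem.List.pyGet? (a :: b :: c :: d :: e :: f :: g :: rest) (4 : Int) = some e := by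
      rw [show (4 : Int) = ((4 : Nat) : Int) from rfl, PySem.List.pyGet?_natCast]; rfl
    have g5 : PySem.List.pyGet? (a :: b :: c :: d :: e :: f :: g :: rest) (5 : Int) = some f := by
      rw [show (5 : Int) = ((5 : Nat) : Int) from rfl, PySem.List.pyGet?_natCast]; rfl
    have g6 : PySem.List.pyGet? (a :: b :: c :: d :: e :: f :: g :: rest) (6 : Int) = some g := by
      rw [show (6 : Int) = ((6 : Nat) : Int) from rfl, PySem.List.pyGet?_natCast]; rfl
    have wk : ∀ (x h : Int),
        (if h > 8 then x + (15 * (h - 8) + 80) else x + 10 * h)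
          = x + (10 * h + 5 * max (h - 8) 0) := by
      intro x h; simp only [Int.max_def]; split_ifs <;> omega
    have we : ∀ (x h : Int),
        (if h > 8 then x + (30 * (h - 8) + 160) else x + 20 * h)
          = x + (20 * h + 10 * max (h - 8) 0) := by
      intro x h; simp only [Int.max_def]; split_ifs <;> omega
    unfold weekly_salary weekly_salary_alt
    rw [show PySem.List.pyRange 0 5 1 = [0, 1, 2, 3, 4] from by decide,
        show PySem.List.pyRange 5 7 1 = [5, 6] from by decide,
        show PySem.List.pyRange 0 7 1 = [0, 1, 2, 3, 4, 5, 6] from by decide]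
    simp only [List.map, List.foldl, g0, g1, g2, g3, g4, g5, g6, Option.getD_some, wk, we]
    have hs2 : ∀ (u v w p q r t : Int),
        PySem.List.slice [u, v, w, p, q, r, t] (some 5) none = [r, t] := by
      intro u v w p q r t
      rw [show (5 : Int) = ((5 : Nat) : Int) from rfl, PySem.List.slice_from_natCast]; rfl
    rw [hs2, hs2]
    simp only [List.sum_cons, List.sum_nil]
    ring
  | [] => simp at hpre
  | [_] => simp at hpre
  | [_,_] => simp at hpre
  | [_,_,_] => simp at hpre
  | [_,_,_,_] => simp at hpre
  | [_,_,_,_,_] => simp at hpre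
  | [_,_,_,_,_,_] => simp at hpre
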